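-- pv_equiv track=rewrite | github.com/kavehfayyazi/rubiks-cube-solver | src/pattern_db/utils.py | edge_ori_decode
-- ===== SOURCE A (Python) =====
-- def edge_ori_decode(val: int):
--     ori = [-1] * 7
--     for i in range(6, -1, -1):
--         ori[i] = val & 1
--         val >>= 1
--     # calculates out the 8th orientation
--     last = sum(ori) % 2
--     ori.append(last)
--     return ori
-- ===== SOURCE B (Python) =====
-- def edge_ori_decode(val: int):
--     bits = format(val & 0x7F, '07b')
--     ori = [1 if c == '1' else 0 for c in bits]
--     ori.append(sum(ori) % 2)
--     return ori
-- ===== Notes on version B (the rewrite author's own statement) =====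
-- stated objective: idiomatic
-- what changed: Replaces the in-place shift loop writing into a preallocated list back-to-front with a single mask plus string binary formatting (format(val & 0x7F, '07b')) read MSB-first, then the parity bit appended.
import Mathlib
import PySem

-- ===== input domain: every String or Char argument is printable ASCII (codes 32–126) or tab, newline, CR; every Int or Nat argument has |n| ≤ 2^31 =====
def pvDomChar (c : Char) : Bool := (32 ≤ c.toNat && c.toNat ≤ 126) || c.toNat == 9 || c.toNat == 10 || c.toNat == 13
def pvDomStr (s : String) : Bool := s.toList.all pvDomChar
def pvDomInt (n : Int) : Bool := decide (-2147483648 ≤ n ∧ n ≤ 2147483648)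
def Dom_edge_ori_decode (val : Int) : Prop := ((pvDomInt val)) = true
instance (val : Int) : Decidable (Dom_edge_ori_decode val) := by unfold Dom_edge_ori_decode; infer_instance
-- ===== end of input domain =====

-- B replaces A's in-place shift loop with a mask plus 7-digit binary string formatting (idiomatic).


-- ===== PORT A =====
-- ori = [-1]*7; for i in range(6,-1,-1): ori[i] = val & 1; val >>= 1
-- (i ranges over 0..6, so ori[i] is List.set at i.toNat — exact here)
def edge_ori_decode (val : Int) : List Int :=
  let st := (PySem.List.pyRange 6 (-1) (-1)).foldl
    (fun (st : List Int × Int) i => (st.1.set i.toNat (PySem.Int.band st.2 1), st.2 >>> (1:Nat)))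
    (List.replicate 7 (-1), val)
  let last := PySem.Int.mod st.1.sum 2
  st.1 ++ [last]

-- ===== PORT B =====
-- format(n, '07b') for 0 ≤ n < 128: seven binary digits, MSB first, built back-to-front
def fmt07bAux : Nat → Int → List Char → List Char
  | 0, _, acc => acc
  | k + 1, n, acc =>
      fmt07bAux k (PySem.Int.floordiv n 2) ((if PySem.Int.mod n 2 == 1 then '1' else '0') :: acc)

def fmt07b (n : Int) : List Char := fmt07bAux 7 n []

def edge_ori_decode_alt (val : Int) : List Int :=
  let bits := fmt07b (PySem.Int.band val 127)
  let ori := bits.map (fun c => if c == '1' then (1:Int) else 0)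
  ori ++ [PySem.Int.mod ori.sum 2]

-- ===== PRECONDITION & SPEC =====
def Spec_edge_ori_decode (val : Int) (out : List Int) : Prop := out = edge_ori_decode_alt val
instance (val : Int) (out : List Int) : Decidable (Spec_edge_ori_decode val out) := by unfold Spec_edge_ori_decode; infer_instance

-- ===== CLAIM (what is proved, stated in full; the proofs are below) =====
def Claim_equal_edge_ori_decode : Prop := ∀ (val : Int), Dom_edge_ori_decode val → Spec_edge_ori_decode val (edge_ori_decode val)

-- ===== LEMMAS AND PROOFS =====

-- Python's a & 127 is the low seven bits, i.e. floor-mod by 128.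
theorem band_127_eq_mod (a : Int) : PySem.Int.band a 127 = a % 128 := by
  unfold PySem.Int.band
  split_ifs with h h2 h2
  · have : a.toNat &&& (127:Int).toNat = a.toNat % 128 := by
      simpa using Nat.and_two_pow_sub_one_eq_mod a.toNat 7
    simp only [this]
    omega
  · omega
  · have : (127:Int).toNat &&& (-a - 1).toNat = (-a - 1).toNat % 128 := by
      rw [Nat.and_comm]
      simpa using Nat.and_two_pow_sub_one_eq_mod (-a - 1).toNat 7
    simp only [this]
    omega
  · omega

theorem pymod_eq (a b : Int) (h : 0 < b) : PySem.Int.mod a b = a % b := by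
  unfold PySem.Int.mod
  rw [Int.fmod_eq_emod]
  simp [Or.inl (le_of_lt h)]

theorem pyfdiv_eq (a b : Int) (h : 0 < b) : PySem.Int.floordiv a b = a / b := by
  unfold PySem.Int.floordiv
  rw [Int.fdiv_eq_ediv]
  simp [Or.inl (le_of_lt h)]

theorem band_one_eq (a : Int) : PySem.Int.band a 1 = a % 2 := by
  rw [PySem.Int.band_one, pymod_eq a 2 (by norm_num)]

-- ===== VERDICT (by name: the statement is the Claim_ definition above) =====
theorem edge_ori_decode_spec : Claim_equal_edge_ori_decode := by
  intro val _
  show edge_ori_decode val = edge_ori_decode_alt val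
  have hrange : PySem.List.pyRange 6 (-1) (-1) = [6, 5, 4, 3, 2, 1, 0] := by decide
  simp only [edge_ori_decode, edge_ori_decode_alt, hrange, fmt07b, fmt07bAux,
    List.foldl_cons, List.foldl_nil, band_127_eq_mod, band_one_eq,
    pymod_eq _ 2 (by norm_num), pyfdiv_eq _ 2 (by norm_num),
    List.replicate, List.map_cons, List.map_nil, List.sum_cons,
    Int.shiftRight_eq_div_pow, List.cons_append, List.nil_append]
  have h6 : (6:Int).toNat = 6 := rfl
  have h5 : (5:Int).toNat = 5 := rfl
  have h4 : (4:Int).toNat = 4 := rfl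
  have h3 : (3:Int).toNat = 3 := rfl
  have h2 : (2:Int).toNat = 2 := rfl
  simp only [h6, h5, h4, h3, h2]
  norm_num [List.set]
  simp only [show ('0' = '1') = False from by decide, imp_false]
  have key : ∀ x : Int, (if ¬2 ∣ x then (1:Int) else 0) = x % 2 := by
    intro x; split_ifs <;> omega
  simp only [key]
  have b1 : val / 2 % 2 = val % 128 / 2 % 2 := by omega
  have b2 : val / 2 / 2 % 2 = val % 128 / 2 / 2 % 2 := by omega
  have b3 : val / 2 / 2 / 2 % 2 = val % 128 / 2 / 2 / 2 % 2 := by omega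
  have b4 : val / 2 / 2 / 2 / 2 % 2 = val % 128 / 2 / 2 / 2 / 2 % 2 := by omega
  have b5 : val / 2 / 2 / 2 / 2 / 2 % 2 = val % 128 / 2 / 2 / 2 / 2 / 2 % 2 := by omega
  have b6 : val / 2 / 2 / 2 / 2 / 2 / 2 % 2 = val % 128 / 2 / 2 / 2 / 2 / 2 / 2 % 2 := by omega
  have lem : ∀ a b S T : Int, a % 2 = b % 2 → S = T → (a + S) % 2 = (b % 2 + T) % 2 := by
    intro a b S T h1 h2; subst h2; omega
  exact ⟨b6, b5, b4, b3, b2, b1, trivial, lem _ _ _ _ b6 (by rw [b5, b4, b3, b2, b1])⟩
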